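-- pv_equiv track=rewrite | github.com/Dallahi-Ms/CS50P | Problem Set 2/plates.py | numbs
-- ===== SOURCE A (Python) =====
-- def numbs(d):
--     numbers = []
--     for letter in d:
--         if letter.isdigit():
--             numbers.append(letter)
--     if numbers:
--         if numbers[0] == '0':
--             return False
--     return True
-- ===== SOURCE B (Python) =====
-- def numbs(d):
--     i = d.find('0')
--     if i == -1:
--         return True
--     return any(c.isdigit() for c in d[:i])
-- ===== Notes on version B (the rewrite author's own statement) =====
-- stated objective: faster
-- what changed: B inverts the search: instead of scanning characters for digits and testing the first one, it locates the first zero character with str.find and returns whether some other digit occurs before that position (no zero at all means True).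
import Mathlib
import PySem

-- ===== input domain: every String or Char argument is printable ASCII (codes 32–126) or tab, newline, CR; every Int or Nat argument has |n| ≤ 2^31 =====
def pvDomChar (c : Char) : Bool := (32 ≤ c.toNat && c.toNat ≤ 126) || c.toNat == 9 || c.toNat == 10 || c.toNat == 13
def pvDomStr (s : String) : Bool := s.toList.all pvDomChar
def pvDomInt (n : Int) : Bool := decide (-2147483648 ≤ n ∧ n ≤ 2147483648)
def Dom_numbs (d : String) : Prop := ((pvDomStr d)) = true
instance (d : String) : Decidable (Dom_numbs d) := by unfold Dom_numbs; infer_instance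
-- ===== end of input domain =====

-- B inverts the search: it locates the first '0' with str.find and asks whether another digit precedes it,
-- instead of A's collect-all-digits-then-test-the-first (str.find does the scan in C).

-- ===== PORT A =====
-- literal port of A: build the list of digit characters, then inspect element 0
def numbs (d : String) : Bool :=
  let numbers := d.toList.foldl (fun acc c => if PySem.Str.isdigit c then acc ++ [c] else acc) []
  if numbers ≠ [] then
    if numbers[0]? = some '0' then false else true
  else true

-- ===== PORT B =====
-- port of B: i = d.find('0'); if i == -1: True; else any(c.isdigit() for c in d[:i])
def numbs_alt (d : String) : Bool :=
  let i := PySem.Str.find d "0"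
  if i = -1 then true
  else (PySem.Chars.slice d.toList none (some i)).any (fun c => PySem.Str.isdigit c)

-- ===== PRECONDITION & SPEC =====
def Spec_numbs (d : String) (out : Bool) : Prop := out = numbs_alt d
instance (d : String) (out : Bool) : Decidable (Spec_numbs d out) := by unfold Spec_numbs; infer_instance

-- ===== CLAIM (what is proved, stated in full; the proofs are below) =====
def Claim_equal_numbs : Prop := ∀ (d : String), Dom_numbs d → Spec_numbs d (numbs d)

-- ===== LEMMAS AND PROOFS =====

-- A's digit-collecting fold equals List.filter
theorem numbs_fold_filter (l acc : List Char) :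
    l.foldl (fun acc c => if PySem.Str.isdigit c then acc ++ [c] else acc) acc
      = acc ++ l.filter (fun c => PySem.Str.isdigit c) := by
  induction l generalizing acc with
  | nil => simp
  | cons c t ih =>
    by_cases h : PySem.Str.isdigit c <;> simp [List.foldl, h, ih]

-- A computed via the first digit of the list
theorem numbs_eq_find? (d : String) :
    numbs d = (if d.toList.find? (fun c => PySem.Str.isdigit c) = some '0' then false else true) := by
  unfold numbs
  simp only [numbs_fold_filter, List.nil_append]
  rw [← List.head?_eq_getElem?, List.head?_filter]
  cases h : d.toList.find? (fun c => PySem.Str.isdigit c) with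
  | none => simp
  | some c' =>
    by_cases hc : c' = '0'
    · subst hc
      have : ∃ x ∈ d.toList, PySem.Str.isdigit x = true :=
        ⟨'0', List.mem_of_find?_eq_some h, List.find?_some h⟩
      simp [this]
    · simp [hc]

-- a one-character infix is just membership
theorem singleton_infix_of_mem {c : Char} {l : List Char} (h : c ∈ l) : [c] <:+: l := by
  obtain ⟨pre, suf, rfl⟩ := List.append_of_mem h
  exact ⟨pre, suf, by simp⟩

-- ===== VERDICT (by name: the statement is the Claim_ definition above) =====
theorem numbs_spec : Claim_equal_numbs := by
  intro d _
  unfold Spec_numbs numbs_alt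
  rw [numbs_eq_find?]
  simp only [PySem.Str.find_eq]
  set l := d.toList with hl
  by_cases hneg : PySem.Chars.find l "0".toList = -1
  · -- no '0' in the string: the first digit (if any) is not '0'
    rw [if_pos hneg] at *
    have hni : ¬ ("0".toList <:+: l) := (PySem.Chars.find_eq_neg_one_iff l _).mp hneg
    cases hf : l.find? (fun c => PySem.Str.isdigit c) with
    | none => simp
    | some c =>
      by_cases hc : c = '0'
      · refine absurd (singleton_infix_of_mem (c := '0') ?_) (by simpa using hni)
        rw [← hc]; exact List.mem_of_find?_eq_some hf
      · simp [hc]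
  · rw [if_neg hneg]
    have hpos : 0 ≤ PySem.Chars.find l "0".toList := by
      have := PySem.Chars.neg_one_le_find (s := l) (sub := "0".toList)
      omega
    obtain ⟨hpre, hmin⟩ := PySem.Chars.find_spec (s := l) (sub := "0".toList) hpos
    set n := (PySem.Chars.find l "0".toList).toNat with hn
    have hlen : (PySem.Chars.find l "0".toList) ≤ l.length := PySem.Chars.find_le_length l _
    have hnle : n ≤ l.length := by omega
    have hslice : PySem.Chars.slice l none (some (PySem.Chars.find l "0".toList)) = l.take n := by
      simp only [PySem.Chars.slice]
      exact PySem.List.slice_to _ hpos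
    rw [hslice]
    -- every char strictly before index n is not '0'
    have hpref : ∀ c ∈ l.take n, c ≠ '0' := by
      intro c hc hc0
      obtain ⟨j, hj, hje⟩ := List.mem_take_iff_getElem.mp hc
      have hjn : j < n := lt_of_lt_of_le hj (min_le_left _ _)
      have hjl : j < l.length := lt_of_lt_of_le hjn hnle
      apply hmin j hjn
      refine ⟨(l.drop (j+1)), ?_⟩
      have : l.drop j = l[j] :: l.drop (j+1) := List.drop_eq_getElem_cons hjl
      simp [this, hje, hc0]
    -- l.drop n starts with '0'
    obtain ⟨rest, hrest⟩ : ∃ rest, l.drop n = '0' :: rest := by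
      obtain ⟨t, ht⟩ := hpre
      exact ⟨t, by simpa using ht.symm⟩
    have hsplit : l = l.take n ++ '0' :: rest := by
      conv_lhs => rw [← List.take_append_drop n l]
      rw [hrest]
    have hfind : List.find? (fun c => PySem.Str.isdigit c) l
        = ((l.take n).find? (fun c => PySem.Str.isdigit c)).or (('0' :: rest).find? (fun c => PySem.Str.isdigit c)) := by
      conv_lhs => rw [hsplit]
      exact List.find?_append
    rw [hfind]
    cases hfp : (l.take n).find? (fun c => PySem.Str.isdigit c) with
    | none =>
      have hany : (l.take n).any (fun c => PySem.Str.isdigit c) = false := by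
        rw [List.any_eq_false]
        intro c hc
        simpa using List.find?_eq_none.mp hfp c hc
      simp [hany, show PySem.Str.isdigit '0' = true from by decide]
    | some c =>
      have hcd : PySem.Str.isdigit c = true := List.find?_some hfp
      have hcm : c ∈ l.take n := List.mem_of_find?_eq_some hfp
      have hany : (l.take n).any (fun c => PySem.Str.isdigit c) = true :=
        List.any_eq_true.mpr ⟨c, hcm, hcd⟩
      simp [hany, hpref c hcm]
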